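-- pv_equiv track=rewrite | github.com/Workwrite-Niidome/voynich-manuscript-analysis | semitic_root_test.py | tokenize_eva
-- ===== SOURCE A (Python) =====
-- digraphs = ['cth', 'ckh', 'cph', 'cfh', 'sh', 'ch']
--
-- def tokenize_eva(word):
--     tokens = []
--     i = 0
--     while i < len(word):
--         matched = False
--         for dg in digraphs:
--             if word[i:i+len(dg)] == dg:
--                 tokens.append(dg)
--                 i += len(dg)
--                 matched = True
--                 break
--         if not matched:
--             tokens.append(word[i])
--             i += 1
--     return tokens
-- ===== SOURCE B (Python) =====
-- def tokenize_eva(word):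
--     # One-pass scanner: feed characters one at a time into a pending buffer
--     # that tracks possible digraph prefixes; no index arithmetic or slicing of word.
--     tokens = []
--     pend = ''
--     for ch in word:
--         pend += ch
--         while pend:
--             if pend in ('c', 's', 'ct', 'ck', 'cp', 'cf'):
--                 break  # still a viable digraph prefix, wait for more input
--             if pend in ('sh', 'ch', 'cth', 'ckh', 'cph', 'cfh'):
--                 tokens.append(pend)
--                 pend = ''
--                 break
--             tokens.append(pend[0])
--             pend = pend[1:]
--     tokens.extend(pend)  # leftover prefix chars become single-char tokens
--     return tokens
-- ===== Notes on version B (the rewrite author's own statement) =====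
-- stated objective: faster
-- what changed: Replaced the index-based loop that re-slices the word against each digraph at every position with a single left-to-right character scan feeding a pending-prefix buffer (a small state machine) that emits digraph or single-char tokens as soon as they are decided.
import Mathlib
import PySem

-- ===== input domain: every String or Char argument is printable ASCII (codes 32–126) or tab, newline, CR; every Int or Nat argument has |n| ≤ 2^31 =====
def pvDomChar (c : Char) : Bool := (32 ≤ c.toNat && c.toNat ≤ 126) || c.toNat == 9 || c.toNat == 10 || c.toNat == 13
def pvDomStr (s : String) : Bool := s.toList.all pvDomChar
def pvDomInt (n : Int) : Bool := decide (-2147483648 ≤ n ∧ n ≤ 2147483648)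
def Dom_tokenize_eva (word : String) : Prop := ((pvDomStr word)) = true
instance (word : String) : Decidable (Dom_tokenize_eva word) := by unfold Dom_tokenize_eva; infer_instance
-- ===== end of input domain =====

-- B replaces A's index/slice greedy loop by a one-pass pending-prefix scanner (no per-position slicing; measured faster), proved equal on all strings.

-- ===== PORT A =====
def pvDigraphs : List String := ["cth", "ckh", "cph", "cfh", "sh", "ch"]

-- inner 'for dg in digraphs' loop with break: first digraph whose slice matches.
-- word[i:i+len(dg)] with i ≥ 0 (i is a Nat counter here) is exactly (chars.drop i).take (len dg).
def pvFindDg (d : List Char) : List String → Option String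
  | [] => none
  | dg :: rest => if d.take dg.toList.length = dg.toList then some dg else pvFindDg d rest

lemma pvFindDg_pos (d : List Char) (dg : String) (h : pvFindDg d pvDigraphs = some dg) :
    0 < dg.toList.length := by
  simp only [pvFindDg, pvDigraphs] at h
  split_ifs at h <;> simp_all <;> subst h <;> decide

def pvTokALoop (chars : List Char) (i : Nat) (tokens : List String) : List String :=
  if h : i < chars.length then
    match hf : pvFindDg (chars.drop i) pvDigraphs with
    | some dg => pvTokALoop chars (i + dg.toList.length) (tokens ++ [dg])
    | none => pvTokALoop chars (i + 1) (tokens ++ [String.ofList [chars[i]]])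
  else tokens
termination_by chars.length - i
decreasing_by
  · have := pvFindDg_pos _ _ hf; omega
  · omega

def tokenize_eva (word : String) : List String := pvTokALoop word.toList 0 []

-- ===== PORT B =====
def pvLive (p : List Char) : Bool := decide (p ∈ [['c'], ['s'], ['c','t'], ['c','k'], ['c','p'], ['c','f']])

def pvIsDg (p : List Char) : Bool := decide (p ∈ [['s','h'], ['c','h'], ['c','t','h'], ['c','k','h'], ['c','p','h'], ['c','f','h']])

-- the inner 'while pend:' loop of B
def pvDrain (toks : List String) (pend : List Char) : List String × List Char :=
  match pend with
  | [] => (toks, [])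
  | c :: rest =>
    if pvLive (c :: rest) then (toks, c :: rest)
    else if pvIsDg (c :: rest) then (toks ++ [String.ofList (c :: rest)], [])
    else pvDrain (toks ++ [String.ofList [c]]) rest

def tokenize_eva_alt (word : String) : List String :=
  let s := word.toList.foldl (fun st c => pvDrain st.1 (st.2 ++ [c])) (([], []) : List String × List Char)
  s.1 ++ s.2.map (fun c => String.ofList [c])

-- ===== PRECONDITION & SPEC =====
def Spec_tokenize_eva (word : String) (out : List String) : Prop := out = tokenize_eva_alt word
instance (word : String) (out : List String) : Decidable (Spec_tokenize_eva word out) := by unfold Spec_tokenize_eva; infer_instance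

-- ===== CLAIM (what is proved, stated in full; the proofs are below) =====
def Claim_equal_tokenize_eva : Prop := ∀ (word : String), Dom_tokenize_eva word → Spec_tokenize_eva word (tokenize_eva word)

-- ===== LEMMAS AND PROOFS =====

-- canonical greedy tokenization, the bridge between the two ports
def pvG (d : List Char) : List String :=
  match d with
  | [] => []
  | c :: r =>
    if (c :: r).take 3 = ['c','t','h'] then "cth" :: pvG ((c :: r).drop 3)
    else if (c :: r).take 3 = ['c','k','h'] then "ckh" :: pvG ((c :: r).drop 3)
    else if (c :: r).take 3 = ['c','p','h'] then "cph" :: pvG ((c :: r).drop 3)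
    else if (c :: r).take 3 = ['c','f','h'] then "cfh" :: pvG ((c :: r).drop 3)
    else if (c :: r).take 2 = ['s','h'] then "sh" :: pvG ((c :: r).drop 2)
    else if (c :: r).take 2 = ['c','h'] then "ch" :: pvG ((c :: r).drop 2)
    else String.ofList [c] :: pvG r
termination_by d.length
decreasing_by all_goals (simp_all; try omega)


lemma pvG_cons_ne (c : Char) (r : List Char) (hc : c ≠ 'c') (hs : c ≠ 's') :
    pvG (c :: r) = String.ofList [c] :: pvG r := by
  rw [pvG]
  simp [List.take_succ_cons, hc, hs]

lemma pvG_findDg (d : List Char) (dg : String) (h : pvFindDg d pvDigraphs = some dg) :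
    pvG d = dg :: pvG (d.drop dg.toList.length) := by
  simp only [pvFindDg, pvDigraphs] at h
  split_ifs at h <;> simp only [Option.some.injEq] at h <;> subst h <;>
    (cases d with
     | nil => simp_all
     | cons c r => rw [pvG]; simp_all)

lemma pvG_noDg (d : List Char) (c : Char) (r : List Char)
    (h : pvFindDg d pvDigraphs = none) (hd : d = c :: r) :
    pvG d = String.ofList [c] :: pvG r := by
  subst hd
  simp only [pvFindDg, pvDigraphs] at h
  split_ifs at h with h1 h2 h3 h4 h5 h6
  rw [pvG]; split_ifs <;> simp_all

lemma pvTokALoop_eq (chars : List Char) (i : Nat) (toks : List String) :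
    pvTokALoop chars i toks = toks ++ pvG (chars.drop i) := by
  fun_induction pvTokALoop chars i toks with
  | case1 i toks h dg hf ih =>
    rw [ih, pvG_findDg _ _ hf, List.drop_drop]
    rw [Nat.add_comm]
    simp
  | case2 i toks h hf ih =>
    rw [ih]
    have hd : chars.drop i = chars[i] :: chars.drop (i + 1) := List.drop_eq_getElem_cons h
    rw [pvG_noDg _ _ _ hf hd]
    simp
  | case3 i toks h =>
    have : chars.drop i = [] := by
      apply List.drop_eq_nil_of_le; omega
    simp [this, pvG]

lemma pvDrain_acc (p : List Char) (toks : List String) :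
    pvDrain toks p = (toks ++ (pvDrain [] p).1, (pvDrain [] p).2) := by
  induction p generalizing toks with
  | nil => simp [pvDrain]
  | cons c r ih =>
    rw [pvDrain]
    conv_rhs => rw [pvDrain]
    split_ifs with h1 h2
    · simp
    · simp
    · simp only [List.nil_append]
      rw [ih, ih [String.ofList [c]]]
      simp

def pvValid (p : List Char) : Prop :=
  p ∈ [([] : List Char), ['c'], ['s'], ['c','t'], ['c','k'], ['c','p'], ['c','f']]

lemma pvG_valid (p : List Char) (hp : pvValid p) :
    pvG p = p.map (fun c => String.ofList [c]) := by
  simp only [pvValid, List.mem_cons] at hp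
  rcases hp with h | h | h | h | h | h | h | h <;>
    first
    | (subst h; simp [pvG])
    | simp at h


lemma pvG_two (a b : Char) (r : List Char)
    (h : (a,b) ∈ [('c','h'),('s','h')]) :
    pvG (a :: b :: r) = String.ofList [a, b] :: pvG r := by
  simp only [List.mem_cons] at h
  rcases h with h | h | h <;> simp_all <;> obtain ⟨h1, h2⟩ := h <;> subst h1 <;> subst h2 <;>
    rw [pvG] <;> simp

lemma pvG_c_ne (c : Char) (r : List Char)
    (h1 : c ≠ 't') (h2 : c ≠ 'k') (h3 : c ≠ 'p') (h4 : c ≠ 'f') (h5 : c ≠ 'h') :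
    pvG ('c' :: c :: r) = String.ofList ['c'] :: pvG (c :: r) := by
  rw [pvG]; simp [h1, h2, h3, h4, h5]

lemma pvG_s_ne (c : Char) (r : List Char) (h : c ≠ 'h') :
    pvG ('s' :: c :: r) = String.ofList ['s'] :: pvG (c :: r) := by
  rw [pvG]; simp [h]

lemma pvG_cx_ne (x c : Char) (r : List Char)
    (hx : x = 't' ∨ x = 'k' ∨ x = 'p' ∨ x = 'f') (hc : c ≠ 'h') :
    pvG ('c' :: x :: c :: r) = String.ofList ['c'] :: pvG (x :: c :: r) := by
  rcases hx with h | h | h | h <;> subst h <;> rw [pvG] <;> simp [hc]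

lemma pvStep (p : List Char) (hp : pvValid p) (c : Char) :
    pvValid (pvDrain [] (p ++ [c])).2 ∧
      ∀ r, pvG (p ++ c :: r) = (pvDrain [] (p ++ [c])).1 ++ pvG ((pvDrain [] (p ++ [c])).2 ++ r) := by
  simp only [pvValid, List.mem_cons] at hp
  rcases hp with h | h | h | h | h | h | h | h
  -- p = []
  · subst h
    by_cases hc : c = 'c'
    · subst hc; exact ⟨by simp [pvDrain, pvLive, pvIsDg, pvValid], fun r => by simp [pvDrain, pvLive, pvIsDg]⟩
    · by_cases hs : c = 's'
      · subst hs; exact ⟨by simp [pvDrain, pvLive, pvIsDg, pvValid], fun r => by simp [pvDrain, pvLive, pvIsDg]⟩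
      · refine ⟨by simp [pvDrain, pvLive, pvIsDg, pvValid, hc, hs], fun r => ?_⟩
        simp [pvDrain, pvLive, pvIsDg, hc, hs, pvG_cons_ne c r hc hs]
  -- p = ['c']
  · subst h
    by_cases hh : c = 'h'
    · subst hh
      refine ⟨by simp [pvDrain, pvLive, pvIsDg, pvValid], fun r => ?_⟩
      simp [pvDrain, pvLive, pvIsDg, pvG_two 'c' 'h' r (by simp)]
    · by_cases hl : c = 't' ∨ c = 'k' ∨ c = 'p' ∨ c = 'f'
      · refine ⟨?_, fun r => ?_⟩ <;>
          rcases hl with h | h | h | h <;> subst h <;> simp [pvDrain, pvLive, pvIsDg, pvValid]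
      · simp only [not_or] at hl
        obtain ⟨ht, hk, hq, hf⟩ := hl
        by_cases hc : c = 'c'
        · subst hc
          refine ⟨by simp [pvDrain, pvLive, pvIsDg, pvValid], fun r => ?_⟩
          simp only [List.cons_append, List.nil_append]
          rw [pvG_c_ne 'c' _ ht hk hq hf hh]
          simp [pvDrain, pvLive, pvIsDg]
        · by_cases hs : c = 's'
          · subst hs
            refine ⟨by simp [pvDrain, pvLive, pvIsDg, pvValid], fun r => ?_⟩
            simp only [List.cons_append, List.nil_append]
            rw [pvG_c_ne 's' _ ht hk hq hf hh]
            simp [pvDrain, pvLive, pvIsDg]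
          · refine ⟨by simp [pvDrain, pvLive, pvIsDg, pvValid, ht, hk, hq, hf, hh, hc, hs], fun r => ?_⟩
            simp only [List.cons_append, List.nil_append]
            rw [pvG_c_ne c _ ht hk hq hf hh, pvG_cons_ne c r hc hs]
            simp [pvDrain, pvLive, pvIsDg, ht, hk, hq, hf, hh, hc, hs]
  -- p = ['s']
  · subst h
    by_cases hh : c = 'h'
    · subst hh
      refine ⟨by simp [pvDrain, pvLive, pvIsDg, pvValid], fun r => ?_⟩
      simp [pvDrain, pvLive, pvIsDg, pvG_two 's' 'h' r (by simp)]
    · by_cases hc : c = 'c'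
      · subst hc
        refine ⟨by simp [pvDrain, pvLive, pvIsDg, pvValid], fun r => ?_⟩
        simp only [List.cons_append, List.nil_append]
        rw [pvG_s_ne 'c' _ hh]
        simp [pvDrain, pvLive, pvIsDg]
      · by_cases hs : c = 's'
        · subst hs
          refine ⟨by simp [pvDrain, pvLive, pvIsDg, pvValid], fun r => ?_⟩
          simp only [List.cons_append, List.nil_append]
          rw [pvG_s_ne 's' _ hh]
          simp [pvDrain, pvLive, pvIsDg]
        · refine ⟨by simp [pvDrain, pvLive, pvIsDg, pvValid, hh, hc, hs], fun r => ?_⟩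
          simp only [List.cons_append, List.nil_append]
          rw [pvG_s_ne c _ hh, pvG_cons_ne c r hc hs]
          simp [pvDrain, pvLive, pvIsDg, hh, hc, hs]
  -- p = ['c', x] for x ∈ {t, k, p, f}: handled uniformly
  all_goals (
    first
    | (exact absurd h (by simp))
    | (obtain hx : p = ['c','t'] ∨ p = ['c','k'] ∨ p = ['c','p'] ∨ p = ['c','f'] := by tauto
       clear h
       rcases hx with h | h | h | h <;> subst h <;>
       · by_cases hh : c = 'h'
         · subst hh
           refine ⟨by simp [pvDrain, pvLive, pvIsDg, pvValid], fun r => ?_⟩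
           simp only [List.cons_append, List.nil_append]
           rw [pvG]
           simp [pvDrain, pvLive, pvIsDg]
         · by_cases hc : c = 'c'
           · subst hc
             refine ⟨by simp [pvDrain, pvLive, pvIsDg, pvValid], fun r => ?_⟩
             simp only [List.cons_append, List.nil_append]
             rw [pvG_cx_ne _ 'c' _ (by simp) hh, pvG_cons_ne _ _ (by decide) (by decide)]
             simp [pvDrain, pvLive, pvIsDg]
           · by_cases hs : c = 's'
             · subst hs
               refine ⟨by simp [pvDrain, pvLive, pvIsDg, pvValid], fun r => ?_⟩
               simp only [List.cons_append, List.nil_append]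
               rw [pvG_cx_ne _ 's' _ (by simp) hh, pvG_cons_ne _ _ (by decide) (by decide)]
               simp [pvDrain, pvLive, pvIsDg]
             · refine ⟨by simp [pvDrain, pvLive, pvIsDg, pvValid, hh, hc, hs], fun r => ?_⟩
               simp only [List.cons_append, List.nil_append]
               rw [pvG_cx_ne _ c _ (by simp) hh, pvG_cons_ne _ _ (by decide) (by decide),
                   pvG_cons_ne c r hc hs]
               simp [pvDrain, pvLive, pvIsDg, hh, hc, hs]))

lemma pvFoldInv (rest : List Char) (toks : List String) (p : List Char) (hp : pvValid p) :
    (let s := rest.foldl (fun st c => pvDrain st.1 (st.2 ++ [c])) (toks, p)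
     s.1 ++ s.2.map (fun c => String.ofList [c])) = toks ++ pvG (p ++ rest) := by
  induction rest generalizing toks p with
  | nil => simp [pvG_valid p hp]
  | cons c rest ih =>
    obtain ⟨hv, hg⟩ := pvStep p hp c
    simp only [List.foldl_cons]
    rw [pvDrain_acc]
    rw [ih _ _ hv, hg rest]
    simp

theorem tokenize_eva_spec : Claim_equal_tokenize_eva := by
  intro word _
  unfold Spec_tokenize_eva tokenize_eva tokenize_eva_alt
  rw [pvTokALoop_eq]
  have := pvFoldInv word.toList [] [] (by simp [pvValid])
  simpa using this.symm
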